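-- pv_equiv track=rewrite | github.com/princengoc/tropicalsemigroup | newton.py | _rPath
-- ===== SOURCE A (Python) =====
-- def _rPath(v,w,upper = True):
--   """Compute the r path in the square with opposite vertices
--   v and w. Assume v < w.
--   Upper = True: max path on this square.
--   Upper = False: min path on this square."""
--   if upper:
--     #add the vertical points
--     up = [(v[0],v[1]+i) for i in range(w[1]-v[1]+1)]
--     #add the horizontal points
--     right = [(v[0]+i,w[1]) for i in range(1,w[0]-v[0]+1)]
--     return up + right
--   else:
--     up = [(w[0],v[1]+i) for i in range(1,w[1]-v[1]+1)]
--     right = [(v[0]+i,v[1]) for i in range(w[0]-v[0]+1)]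
--     return right+up
-- ===== SOURCE B (Python) =====
-- def _point(v, w, upper, n1, t):
--     """t-th point of the path, computed directly from the global index t."""
--     if upper:
--         return (v[0], v[1] + t) if t < n1 else (v[0] + t - n1 + 1, w[1])
--     else:
--         return (v[0] + t, v[1]) if t < n1 else (w[0], v[1] + t - n1 + 1)
--
-- def _rPath(v, w, upper=True):
--     """Closed-form point function over a single global index: the path has
--     n1 points on the first side (corner included) and n2 on the second; each
--     point is computed independently from its index t, no staged sides."""
--     if upper:
--         n1 = max(w[1] - v[1] + 1, 0)
--         n2 = max(w[0] - v[0], 0)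
--     else:
--         n1 = max(w[0] - v[0] + 1, 0)
--         n2 = max(w[1] - v[1], 0)
--     return [_point(v, w, upper, n1, t) for t in range(n1 + n2)]
-- ===== Notes on version B (the rewrite author's own statement) =====
-- stated objective: alternative
-- what changed: Replaced the two concatenated staged range-comprehensions per branch by a closed-form point function: each point of the L-path is computed independently from a single global index t over one range(n1+n2), with the side chosen arithmetically by comparing t to the first-side length.
import Mathlib
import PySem

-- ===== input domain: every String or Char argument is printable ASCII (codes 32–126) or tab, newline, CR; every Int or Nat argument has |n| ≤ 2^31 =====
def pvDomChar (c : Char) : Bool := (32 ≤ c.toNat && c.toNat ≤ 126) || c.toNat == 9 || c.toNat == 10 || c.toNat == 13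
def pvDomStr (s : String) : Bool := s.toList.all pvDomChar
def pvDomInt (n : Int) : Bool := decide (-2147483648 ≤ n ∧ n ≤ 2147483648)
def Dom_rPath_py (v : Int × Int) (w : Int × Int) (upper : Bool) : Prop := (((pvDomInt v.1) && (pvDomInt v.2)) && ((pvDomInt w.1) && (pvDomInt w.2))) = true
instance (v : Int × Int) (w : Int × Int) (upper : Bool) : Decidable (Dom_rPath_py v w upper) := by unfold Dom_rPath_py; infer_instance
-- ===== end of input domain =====

-- B replaces A's two concatenated staged comprehensions by a closed-form point
-- function evaluated over one global index range; same value everywhere (alternative).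
-- ===== PORT A =====
def rPath_py (v : Int × Int) (w : Int × Int) (upper : Bool) : List (Int × Int) :=
  if upper then
    let up := (PySem.List.pyRange 0 (w.2 - v.2 + 1) 1).map (fun i => (v.1, v.2 + i))
    let right := (PySem.List.pyRange 1 (w.1 - v.1 + 1) 1).map (fun i => (v.1 + i, w.2))
    up ++ right
  else
    let up := (PySem.List.pyRange 1 (w.2 - v.2 + 1) 1).map (fun i => (w.1, v.2 + i))
    let right := (PySem.List.pyRange 0 (w.1 - v.1 + 1) 1).map (fun i => (v.1 + i, v.2))
    right ++ up

-- ===== PORT B =====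
-- Python helper _point: the t-th point of the path, from the global index t alone
def pvPoint (v : Int × Int) (w : Int × Int) (upper : Bool) (n1 t : Int) : Int × Int :=
  if upper then
    if t < n1 then (v.1, v.2 + t) else (v.1 + t - n1 + 1, w.2)
  else
    if t < n1 then (v.1 + t, v.2) else (w.1, v.2 + t - n1 + 1)

def rPath_py_alt (v : Int × Int) (w : Int × Int) (upper : Bool) : List (Int × Int) :=
  let n1 : Int := if upper then max (w.2 - v.2 + 1) 0 else max (w.1 - v.1 + 1) 0
  let n2 : Int := if upper then max (w.1 - v.1) 0 else max (w.2 - v.2) 0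
  (PySem.List.pyRange 0 (n1 + n2) 1).map (fun t => pvPoint v w upper n1 t)

-- ===== PRECONDITION & SPEC =====
def Spec_rPath_py (v : Int × Int) (w : Int × Int) (upper : Bool) (out : List (Int × Int)) : Prop := out = rPath_py_alt v w upper
instance (v : Int × Int) (w : Int × Int) (upper : Bool) (out : List (Int × Int)) : Decidable (Spec_rPath_py v w upper out) := by unfold Spec_rPath_py; infer_instance

-- ===== CLAIM (what is proved, stated in full; the proofs are below) =====
def Claim_equal_rPath_py : Prop := ∀ (v : Int × Int) (w : Int × Int) (upper : Bool), Dom_rPath_py v w upper → Spec_rPath_py v w upper (rPath_py v w upper)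

-- ===== LEMMAS AND PROOFS =====

-- generic: B's single range split into A's two staged ranges
lemma pv_split (f g F : Int → Int × Int) (a b : Int)
    (hf : ∀ t : Int, 0 ≤ t → t < max (a+1) 0 → F t = f t)
    (hg : ∀ k : Nat, (k:Int) < b → F (max (a+1) 0 + k) = g (1 + k)) :
    (PySem.List.pyRange 0 (max (a+1) 0 + max b 0) 1).map F
      = (PySem.List.pyRange 0 (a+1) 1).map f ++ (PySem.List.pyRange 1 (b+1) 1).map g := by
  rw [PySem.List.pyRange_one, PySem.List.pyRange_one, PySem.List.pyRange_one]
  have h1 : (a + 1 - 0).toNat = (max (a+1) 0).toNat := by omega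
  have h2 : (b + 1 - 1).toNat = (max b 0).toNat := by omega
  have h3 : (max (a+1) 0 + max b 0 - 0).toNat = (max (a+1) 0).toNat + (max b 0).toNat := by omega
  rw [h1, h2, h3, List.range_add]
  simp only [List.map_append, List.map_map]
  congr 1
  · apply List.map_congr_left
    intro k hk
    simp only [List.mem_range] at hk
    simp only [Function.comp, zero_add]
    exact hf k (by positivity) (by omega)
  · apply List.map_congr_left
    intro k hk
    simp only [List.mem_range] at hk
    have := hg k (by omega)
    simp only [Function.comp]
    have he : (0 : Int) + (((max (a+1) 0).toNat + k : Nat) : Int) = max (a+1) 0 + (k:Int) := by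
      push_cast; omega
    rw [he, this]

-- ===== VERDICT (by name: the statement is the Claim_ definition above) =====
theorem rPath_py_spec : Claim_equal_rPath_py := by
  intro v w upper _
  unfold Spec_rPath_py rPath_py rPath_py_alt
  cases upper
  · -- lower: right ++ up = B's single range split at n1
    simp only [Bool.false_eq_true, if_false]
    refine (pv_split (fun i => (v.1 + i, v.2)) (fun i => (w.1, v.2 + i)) _ (w.1 - v.1) (w.2 - v.2) ?_ ?_).symm
    · intro t _ ht2
      simp [pvPoint, ht2]
    · intro k hk
      have h1 : ¬ (max (w.1 - v.1 + 1) 0 + (k : Int) < max (w.1 - v.1 + 1) 0) := by omega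
      simp only [pvPoint, Bool.false_eq_true, if_false, h1, Prod.mk.injEq]
      constructor <;> first | trivial | omega
  · -- upper: up ++ right = B's single range split at n1
    simp only [if_true]
    refine (pv_split (fun i => (v.1, v.2 + i)) (fun i => (v.1 + i, w.2)) _ (w.2 - v.2) (w.1 - v.1) ?_ ?_).symm
    · intro t _ ht2
      simp [pvPoint, ht2]
    · intro k hk
      have h1 : ¬ (max (w.2 - v.2 + 1) 0 + (k : Int) < max (w.2 - v.2 + 1) 0) := by omega
      simp only [pvPoint, if_true, h1, if_false, Prod.mk.injEq]
      constructor <;> first | trivial | omega
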